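-- pv_equiv track=rewrite | github.com/adesupraptolaia/Challange_week1 | Live Code/coba1.py | fullPrima
-- ===== SOURCE A (Python) =====
-- def cekprima(n):
--     if n <= 1 :
--         return False
--     count = 0
--     for i in range(1, n+1):
--         if n%i == 0:
--             count +=1
--     if count==2:
--         return True
--     else:
--         return False
--
-- def fullPrima(n):
--     if cekprima(n) == True:
--         #cek bilangan satuannya
--         while (n != 0):
--             temp = n % 10
--             if cekprima(temp) == True:
--                 n = int(n/10)
--             else:
--                 return False
--         return True
--     else:
--         return False
-- ===== SOURCE B (Python) =====
-- def fullPrima(n):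
--     if n < 2:
--         return False
--     i = 2
--     while i * i <= n:
--         if n % i == 0:
--             return False
--         i += 1
--     while n:
--         if n % 10 not in (2, 3, 5, 7):
--             return False
--         n //= 10
--     return True
-- ===== Notes on version B (the rewrite author's own statement) =====
-- stated objective: faster
-- what changed: Primality is decided by trial division up to sqrt(n) with early exit instead of counting all divisors in 1..n, and the digit check tests membership in {2,3,5,7} directly instead of re-running the divisor-counting primality test on each digit.
import Mathlib
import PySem

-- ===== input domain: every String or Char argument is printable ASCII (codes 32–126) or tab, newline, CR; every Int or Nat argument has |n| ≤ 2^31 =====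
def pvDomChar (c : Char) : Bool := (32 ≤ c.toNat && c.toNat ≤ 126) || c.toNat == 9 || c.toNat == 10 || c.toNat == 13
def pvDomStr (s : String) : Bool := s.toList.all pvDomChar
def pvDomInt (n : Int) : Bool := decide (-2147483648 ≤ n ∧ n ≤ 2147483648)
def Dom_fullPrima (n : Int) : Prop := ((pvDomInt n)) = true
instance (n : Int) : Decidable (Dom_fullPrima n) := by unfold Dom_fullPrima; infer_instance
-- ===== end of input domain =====

-- B replaces A's count-all-divisors primality test (O(n)) by trial division up to √n with
-- early exit, and tests each digit against {2,3,5,7} instead of re-running the divisor count.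

-- ===== PORT A =====
-- cekprima: counts the divisors of n among 1..n and compares the count with 2
def cekprima (n : Int) : Bool :=
  if n ≤ 1 then false
  else
    let count : Int :=
      (PySem.List.pyRange 1 (n + 1) 1).foldl
        (fun c i => if PySem.Int.mod n i == 0 then c + 1 else c) 0
    count == 2

-- termination helper for A's while loop (cited by decreasing_by)
theorem pvTdivAbsLt (n : Int) (h : ¬ (n == 0) = true) : (n.tdiv 10).natAbs < n.natAbs := by
  rw [Int.natAbs_tdiv]
  exact Nat.div_lt_self (by simp at h; omega) (by norm_num)

-- the 'while (n != 0)' loop of fullPrima; int(n/10) truncates toward zero = Int.tdiv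
-- (exact: for |n| ≤ 2^31 the float n/10 converts back to exactly trunc(n/10))
def fullPrimaLoop (n : Int) : Bool :=
  if h : (n == 0) = true then true
  else
    let temp := PySem.Int.mod n 10
    if cekprima temp then fullPrimaLoop (n.tdiv 10)
    else false
termination_by n.natAbs
decreasing_by exact pvTdivAbsLt n h

def fullPrima (n : Int) : Bool :=
  if cekprima n == true then fullPrimaLoop n else false

-- ===== PORT B =====
-- termination helper for B's trial-division loop (cited by decreasing_by)
theorem pvTrialMeasure (n i : Int) (h : (i * i ≤ n)) : (n + 1 - (i + 1)).toNat < (n + 1 - i).toNat := by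
  have hn : 0 ≤ n := le_trans (mul_self_nonneg i) h
  have hin : i ≤ n := by nlinarith [mul_self_nonneg (i - 1)]
  omega

-- B's first while loop: i = 2; while i*i <= n: ...
def trialLoop (n i : Int) : Bool :=
  if h : i * i ≤ n then
    if PySem.Int.mod n i == 0 then false else trialLoop n (i + 1)
  else true
termination_by (n + 1 - i).toNat
decreasing_by exact pvTrialMeasure n i h

-- B's second while loop; it runs only after the prime test, so n ≥ 2: `//` on
-- nonnegative operands is Nat division
def digitsOk (m : Nat) : Bool :=
  if h : m = 0 then true
  else if m % 10 == 2 || m % 10 == 3 || m % 10 == 5 || m % 10 == 7 then digitsOk (m / 10)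
  else false
termination_by m
decreasing_by exact Nat.div_lt_self (Nat.pos_of_ne_zero h) (by norm_num)

def fullPrima_alt (n : Int) : Bool :=
  if n < 2 then false
  else if trialLoop n 2 then digitsOk n.toNat
  else false

-- ===== PRECONDITION & SPEC =====
def Spec_fullPrima (n : Int) (out : Bool) : Prop := out = fullPrima_alt n
instance (n : Int) (out : Bool) : Decidable (Spec_fullPrima n out) := by unfold Spec_fullPrima; infer_instance

-- ===== CLAIM (what is proved, stated in full; the proofs are below) =====
def Claim_equal_fullPrima : Prop := ∀ (n : Int), Dom_fullPrima n → Spec_fullPrima n (fullPrima n)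

-- ===== LEMMAS AND PROOFS =====

-- A's counting loop is a countP
theorem foldl_count (p : Int → Bool) (l : List Int) (c : Int) :
    l.foldl (fun c i => if p i then c + 1 else c) c = c + l.countP p := by
  induction l generalizing c with
  | nil => simp
  | cons x xs ih =>
    simp only [List.foldl_cons, List.countP_cons, ih]
    by_cases hx : p x <;> simp [hx] <;> ring

theorem countP_range_eq_card (m : Nat) (p : Nat → Prop) [DecidablePred p] :
    ((List.range m).countP (fun k => decide (p k))) = ((Finset.range m).filter p).card := by
  have h1 : ((Finset.range m).filter p).card = Multiset.countP p (Finset.range m).val := by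
    rw [Multiset.countP_eq_card_filter]; rfl
  have h2 : (Finset.range m).val = ((List.range m : List ℕ) : Multiset ℕ) := rfl
  rw [h1, h2, Multiset.coe_countP]

theorem card_filter_eq_divisors (m : Nat) (h : 1 ≤ m) :
    ((Finset.range m).filter (fun k => (k + 1) ∣ m)).card = m.divisors.card := by
  refine Finset.card_bij' (fun k _ => k + 1) (fun d _ => d - 1) ?_ ?_ ?_ ?_
  · intro k hk
    simp only [Finset.mem_filter, Finset.mem_range] at hk
    exact Nat.mem_divisors.mpr ⟨hk.2, by omega⟩
  · intro d hd
    rw [Nat.mem_divisors] at hd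
    have h1 : 1 ≤ d := Nat.one_le_iff_ne_zero.mpr (fun h0 => hd.2 (by simpa [h0] using hd.1))
    have hdm : d ≤ m := Nat.le_of_dvd (by omega) hd.1
    simp only [Finset.mem_filter, Finset.mem_range]
    refine ⟨by omega, ?_⟩
    rw [Nat.sub_add_cancel h1]; exact hd.1
  · intro k _; simp
  · intro d hd
    rw [Nat.mem_divisors] at hd
    have h1 : 1 ≤ d := Nat.one_le_iff_ne_zero.mpr (fun h0 => hd.2 (by simpa [h0] using hd.1))
    simp; omega

theorem card_divisors_two_iff (m : Nat) (h : 2 ≤ m) : m.divisors.card = 2 ↔ m.Prime := by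
  constructor
  · intro hc
    have h1 : (1 : ℕ) ∈ m.divisors := Nat.one_mem_divisors.mpr (by omega)
    have hm : m ∈ m.divisors := Nat.mem_divisors_self m (by omega)
    have hsub : ({1, m} : Finset ℕ) ⊆ m.divisors := by
      intro x hx
      rcases Finset.mem_insert.mp hx with rfl | hx
      · exact h1
      · rcases Finset.mem_singleton.mp hx with rfl; exact hm
    have hcard : ({1, m} : Finset ℕ).card = 2 := by
      rw [Finset.card_insert_of_notMem (by simp; omega), Finset.card_singleton]
    have heq : ({1, m} : Finset ℕ) = m.divisors :=
      Finset.eq_of_subset_of_card_le hsub (by omega)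
    rw [Nat.prime_def]
    refine ⟨h, fun d hd => ?_⟩
    have hdm : d ∈ m.divisors := Nat.mem_divisors.mpr ⟨hd, by omega⟩
    rw [← heq] at hdm; simpa using hdm
  · intro hp
    rw [hp.divisors, Finset.card_insert_of_notMem (by simp; omega), Finset.card_singleton]

-- characterisation of A's primality test
theorem cek_iff (n : Int) : cekprima n = true ↔ 2 ≤ n ∧ Nat.Prime n.toNat := by
  unfold cekprima
  by_cases h : n ≤ 1
  · simp only [if_pos h]
    constructor
    · intro hf; exact absurd hf (by simp)
    · rintro ⟨h2, -⟩; omega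
  · have h2 : 2 ≤ n := by omega
    obtain ⟨m, rfl⟩ : ∃ m : Nat, n = (m : Int) := ⟨n.toNat, by omega⟩
    have hm : 2 ≤ m := by exact_mod_cast h2
    simp only [if_neg (by omega : ¬ (m : Int) ≤ 1)]
    rw [foldl_count, PySem.List.pyRange_one, List.countP_map]
    have harg : ((m : Int) + 1 - 1).toNat = m := by omega
    rw [harg]
    have hfun : ((fun i => PySem.Int.mod (m : Int) i == 0) ∘ fun k : Nat => (1 : Int) + (k : Int))
        = fun k : Nat => decide ((k + 1) ∣ m) := by
      funext k
      have : (1 : Int) + (k : Int) = ((k + 1 : Nat) : Int) := by push_cast; ring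
      simp only [Function.comp, this, PySem.Int.mod_natCast]
      by_cases hd : (k + 1) ∣ m
      · simp [hd, Nat.dvd_iff_mod_eq_zero.mp hd]
      · have hmod : ¬ m % (k + 1) = 0 := fun hz => hd (Nat.dvd_iff_mod_eq_zero.mpr hz)
        rw [show (decide ((k + 1) ∣ m)) = false from by simp [hd]]
        simp only [beq_eq_false_iff_ne, ne_eq, Int.natCast_eq_zero]
        exact hmod
    rw [hfun, countP_range_eq_card, card_filter_eq_divisors m (by omega)]
    rw [show ((m : Int).toNat) = m from by omega]
    constructor
    · intro hc
      refine ⟨h2, (card_divisors_two_iff m hm).mp ?_⟩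
      have hc' : (0 : Int) + (m.divisors.card : Int) = 2 := by simpa using hc
      omega
    · rintro ⟨-, hp⟩
      have : m.divisors.card = 2 := (card_divisors_two_iff m hm).mpr hp
      simp [this]

-- characterisation of B's trial-division loop
theorem trialLoop_iff (n : Int) (i : Int) (hi : 2 ≤ i) :
    trialLoop n i = true ↔ ∀ j : Int, i ≤ j → j * j ≤ n → ¬ PySem.Int.mod n j = 0 := by
  generalize hmeas : (n + 1 - i).toNat = meas
  induction meas using Nat.strong_induction_on generalizing i with
  | _ meas ih =>
    rw [trialLoop]
    by_cases h : i * i ≤ n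
    · simp only [dif_pos h]
      by_cases hmod : PySem.Int.mod n i == 0
      · simp only [if_pos hmod]
        constructor
        · intro hfalse; exact absurd hfalse (by simp)
        · intro hall
          exact absurd (by simpa using hmod) (hall i le_rfl h)
      · simp only [if_neg hmod]
        subst hmeas
        rw [ih _ (pvTrialMeasure n i h) (i + 1) (by omega) rfl]
        constructor
        · intro hall j hij hjj
          rcases eq_or_lt_of_le hij with rfl | hlt
          · simpa using hmod
          · exact hall j (by omega) hjj
        · intro hall j hij hjj; exact hall j (by omega) hjj
    · simp only [dif_neg h]
      constructor
      · intro _ j hij hjj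
        have : i * i ≤ j * j := mul_le_mul hij hij (by omega) (by omega)
        omega
      · intro _; trivial

theorem trial_iff (n : Int) (h2 : 2 ≤ n) : trialLoop n 2 = true ↔ Nat.Prime n.toNat := by
  obtain ⟨m, rfl⟩ : ∃ m : Nat, n = (m : Int) := ⟨n.toNat, by omega⟩
  have hm : 2 ≤ m := by exact_mod_cast h2
  rw [trialLoop_iff (m : Int) 2 le_rfl]
  rw [show ((m : Int).toNat) = m from by omega]
  have hsqrt : Nat.Prime m ↔ ∀ a : Nat, 2 ≤ a → a * a ≤ m → ¬ a ∣ m := by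
    rw [Nat.prime_def_le_sqrt]
    constructor
    · rintro ⟨-, hs⟩ a ha hle; exact hs a ha (Nat.le_sqrt'.mpr (by rwa [pow_two]))
    · intro hs
      refine ⟨hm, fun a ha hle => hs a ha ?_⟩
      have := Nat.le_sqrt'.mp hle; rwa [pow_two] at this
  rw [hsqrt]
  constructor
  · intro hall a ha haa
    have := hall (a : Int) (by exact_mod_cast ha) (by exact_mod_cast haa)
    rw [PySem.Int.mod_natCast] at this
    intro hdvd
    exact this (by exact_mod_cast congrArg (Nat.cast : Nat → Int) (Nat.mod_eq_zero_of_dvd hdvd))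
  · intro hall j hj hjj
    obtain ⟨a, rfl⟩ : ∃ a : Nat, j = (a : Int) := ⟨j.toNat, by omega⟩
    rw [PySem.Int.mod_natCast]
    have ha : 2 ≤ a := by exact_mod_cast hj
    have haa : a * a ≤ m := by exact_mod_cast hjj
    intro hzero
    exact hall a ha haa (Nat.dvd_of_mod_eq_zero (by exact_mod_cast hzero))

-- cekprima on a single digit agrees with membership of {2,3,5,7}
theorem cek_digit (d : Int) (h0 : 0 ≤ d) (h9 : d < 10) :
    cekprima d = (d == 2 || d == 3 || d == 5 || d == 7) := by
  interval_cases d <;> decide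

-- A's digit loop equals B's digit loop on nonnegative inputs
theorem loop_eq_digitsOk (n : Int) (hn : 0 ≤ n) : fullPrimaLoop n = digitsOk n.toNat := by
  obtain ⟨m, rfl⟩ : ∃ m : Nat, n = (m : Int) := ⟨n.toNat, by omega⟩
  rw [Int.toNat_natCast]
  clear hn
  induction m using Nat.strong_induction_on with
  | _ m ih =>
    rw [fullPrimaLoop, digitsOk]
    by_cases h : m = 0
    · simp [h]
    · have hne : ¬ (((m : Int)) == 0) = true := by simp [h]
      simp only [dif_neg hne, dif_neg h]
      have h10 : PySem.Int.mod (m : Int) 10 = ((m % 10 : Nat) : Int) := by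
        have hc := PySem.Int.mod_natCast m 10
        rwa [show ((10 : Nat) : Int) = (10 : Int) from by norm_num] at hc
      rw [cek_digit _ (by rw [h10]; positivity)
        (by rw [h10]; exact_mod_cast Nat.mod_lt m (by norm_num))]
      have hcond : (PySem.Int.mod (m : Int) 10 == 2 || PySem.Int.mod (m : Int) 10 == 3 ||
          PySem.Int.mod (m : Int) 10 == 5 || PySem.Int.mod (m : Int) 10 == 7)
          = (m % 10 == 2 || m % 10 == 3 || m % 10 == 5 || m % 10 == 7) := by
        have key : ∀ c : Nat, (((m % 10 : Nat) : Int) == ((c : Nat) : Int)) = (m % 10 == c) := by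
          intro c
          by_cases hac : m % 10 = c
          · simp [hac]
          · have h1 : (((m % 10 : Nat) : Int) == ((c : Nat) : Int)) = false := by
              simp only [beq_eq_false_iff_ne, ne_eq]
              omega
            have h2 : ((m % 10 : Nat) == c) = false := by simp [hac]
            rw [h1, h2]
        rw [h10, show (2 : Int) = ((2 : Nat) : Int) from by norm_num,
            show (3 : Int) = ((3 : Nat) : Int) from by norm_num,
            show (5 : Int) = ((5 : Nat) : Int) from by norm_num,
            show (7 : Int) = ((7 : Nat) : Int) from by norm_num,
            key 2, key 3, key 5, key 7]
      rw [hcond]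
      by_cases hc : (m % 10 == 2 || m % 10 == 3 || m % 10 == 5 || m % 10 == 7) = true
      · rw [if_pos hc, if_pos hc]
        have htdiv : ((m : Int)).tdiv 10 = ((m / 10 : Nat) : Int) := by
          rw [Int.tdiv_eq_ediv_of_nonneg (by positivity)]
          exact_mod_cast (Int.natCast_div m 10).symm
        rw [htdiv]
        exact ih (m / 10) (Nat.div_lt_self (Nat.pos_of_ne_zero h) (by norm_num))
      · rw [if_neg hc, if_neg hc]

-- ===== VERDICT (by name: the statement is the Claim_ definition above) =====
theorem fullPrima_spec : Claim_equal_fullPrima := by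
  intro n _
  unfold Spec_fullPrima fullPrima fullPrima_alt
  by_cases h2 : 2 ≤ n
  · have hprime := cek_iff n
    have htrial := trial_iff n h2
    by_cases hp : Nat.Prime n.toNat
    · have hc : cekprima n = true := hprime.mpr ⟨h2, hp⟩
      have ht : trialLoop n 2 = true := htrial.mpr hp
      rw [hc, ht, if_neg (show ¬ n < 2 by omega),
          if_pos (show ((true : Bool) == true) = true from rfl), if_pos (rfl : (true : Bool) = true)]
      exact loop_eq_digitsOk n (by omega)
    · have hc : cekprima n = false := by
        cases hcek : cekprima n
        · rfl
        · exact absurd (hprime.mp hcek).2 hp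
      have ht : trialLoop n 2 = false := by
        cases htr : trialLoop n 2
        · rfl
        · exact absurd (htrial.mp htr) hp
      rw [hc, ht, if_neg (show ¬ n < 2 by omega)]
      simp
  · have hc : cekprima n = false := by
      cases hcek : cekprima n
      · rfl
      · exact absurd (cek_iff n |>.mp hcek).1 h2
    rw [hc, if_pos (show n < 2 by omega)]
    simp
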